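-- pv_equiv track=rewrite | github.com/AnishIdhayan-1412/hiringpipeline | module3.py | _summarise_events
-- ===== SOURCE A (Python) =====
-- from typing import Any, Dict, List, Optional, Tuple
--
-- EVT_PII_REMOVED:          str = "PII_REMOVED"
--
-- EVT_CV_PARSED:            str = "CV_PARSED"
--
-- EVT_CANDIDATE_RANKED:     str = "CANDIDATE_RANKED"
--
-- EVT_EXPLANATION_WRITTEN:  str = "EXPLANATION_WRITTEN"
--
-- EVT_DATA_RETAINED:        str = "DATA_RETAINED"
--
-- SEV_WARNING:          str = "WARNING"
--
-- SEV_ERROR:            str = "ERROR"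
--
-- def _summarise_events(events: List[Dict[str, Any]]) -> Dict[str, Any]:
--     """Compute summary counts from the event list.
--
--     Args:
--         events: Full list of event dicts.
--
--     Returns:
--         Summary dict with counts by category.
--     """
--     return {
--         "total_events":        len(events),
--         "pii_removal_events":  sum(
--             1 for e in events if e.get("event_type") == EVT_PII_REMOVED
--         ),
--         "cv_parsed_events":    sum(
--             1 for e in events if e.get("event_type") == EVT_CV_PARSED
--         ),
--         "ranking_events":      sum(
--             1 for e in events if e.get("event_type") == EVT_CANDIDATE_RANKED
--         ),
--         "explanation_events":  sum(
--             1 for e in events if e.get("event_type") == EVT_EXPLANATION_WRITTEN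
--         ),
--         "data_retained_events": sum(
--             1 for e in events if e.get("event_type") == EVT_DATA_RETAINED
--         ),
--         "warnings":            sum(
--             1 for e in events if e.get("severity") == SEV_WARNING
--         ),
--         "errors":              sum(
--             1 for e in events if e.get("severity") == SEV_ERROR
--         ),
--     }
-- ===== SOURCE B (Python) =====
-- def _summarise_events(events):
--     """Single pass with explicit accumulators: dispatch each event once."""
--     total = pii = cv = rank = expl = ret = warn = err = 0
--     for e in events:
--         total += 1
--         t = e.get("event_type")
--         if t == "PII_REMOVED":
--             pii += 1
--         elif t == "CV_PARSED":
--             cv += 1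
--         elif t == "CANDIDATE_RANKED":
--             rank += 1
--         elif t == "EXPLANATION_WRITTEN":
--             expl += 1
--         elif t == "DATA_RETAINED":
--             ret += 1
--         s = e.get("severity")
--         if s == "WARNING":
--             warn += 1
--         elif s == "ERROR":
--             err += 1
--     return {
--         "total_events":         total,
--         "pii_removal_events":   pii,
--         "cv_parsed_events":     cv,
--         "ranking_events":       rank,
--         "explanation_events":   expl,
--         "data_retained_events": ret,
--         "warnings":             warn,
--         "errors":               err,
--     }
-- ===== Notes on version B (the rewrite author's own statement) =====
-- stated objective: alternative
-- what changed: Replaces A's eight separate scans over the event list with one explicit loop that maintains eight counters and dispatches each event once through an if/elif chain (the five event types are mutually exclusive, so elif counting equals the independent sums).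
import Mathlib
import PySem

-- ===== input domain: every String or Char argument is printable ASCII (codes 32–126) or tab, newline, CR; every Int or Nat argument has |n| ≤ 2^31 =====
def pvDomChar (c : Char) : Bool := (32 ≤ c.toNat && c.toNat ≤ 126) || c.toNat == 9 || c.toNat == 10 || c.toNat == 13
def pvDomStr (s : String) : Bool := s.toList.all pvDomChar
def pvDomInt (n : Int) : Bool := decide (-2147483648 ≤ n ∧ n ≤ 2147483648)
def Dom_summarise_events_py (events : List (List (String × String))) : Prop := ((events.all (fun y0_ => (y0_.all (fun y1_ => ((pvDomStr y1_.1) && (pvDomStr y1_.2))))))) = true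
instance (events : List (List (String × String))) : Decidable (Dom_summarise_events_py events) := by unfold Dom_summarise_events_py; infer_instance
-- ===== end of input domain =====

-- B replaces A's eight separate scans with ONE explicit loop keeping eight counters and
-- dispatching each event once through an if/elif chain; same return value (alternative decomposition).

-- shared primitive: Python's e.get(k) on the association-list encoding of a dict (first match)
def pvGetKey (e : List (String × String)) (k : String) : Option String :=
  (e.find? (fun p => p.1 == k)).map (·.2)

-- ===== PORT A =====
def summarise_events_py (events : List (List (String × String))) : List (String × Int) :=
  [("total_events", (events.length : Int)),
   ("pii_removal_events",
     ((events.map (fun e => if pvGetKey e "event_type" == some "PII_REMOVED" then (1 : Int) else 0)).sum)),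
   ("cv_parsed_events",
     ((events.map (fun e => if pvGetKey e "event_type" == some "CV_PARSED" then (1 : Int) else 0)).sum)),
   ("ranking_events",
     ((events.map (fun e => if pvGetKey e "event_type" == some "CANDIDATE_RANKED" then (1 : Int) else 0)).sum)),
   ("explanation_events",
     ((events.map (fun e => if pvGetKey e "event_type" == some "EXPLANATION_WRITTEN" then (1 : Int) else 0)).sum)),
   ("data_retained_events",
     ((events.map (fun e => if pvGetKey e "event_type" == some "DATA_RETAINED" then (1 : Int) else 0)).sum)),
   ("warnings",
     ((events.map (fun e => if pvGetKey e "severity" == some "WARNING" then (1 : Int) else 0)).sum)),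
   ("errors",
     ((events.map (fun e => if pvGetKey e "severity" == some "ERROR" then (1 : Int) else 0)).sum))]

-- ===== PORT B =====
-- loop body of Source B: one event updates the eight counters (if/elif chains, in source order)
def pvStepB (acc : Int × Int × Int × Int × Int × Int × Int × Int)
    (e : List (String × String)) : Int × Int × Int × Int × Int × Int × Int × Int :=
  match acc with
  | (total, pii, cv, rank, expl, ret, warn, err) =>
    let t := pvGetKey e "event_type"
    let s := pvGetKey e "severity"
    let (pii, cv, rank, expl, ret) :=
      if t == some "PII_REMOVED" then (pii + 1, cv, rank, expl, ret)
      else if t == some "CV_PARSED" then (pii, cv + 1, rank, expl, ret)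
      else if t == some "CANDIDATE_RANKED" then (pii, cv, rank + 1, expl, ret)
      else if t == some "EXPLANATION_WRITTEN" then (pii, cv, rank, expl + 1, ret)
      else if t == some "DATA_RETAINED" then (pii, cv, rank, expl, ret + 1)
      else (pii, cv, rank, expl, ret)
    let (warn, err) :=
      if s == some "WARNING" then (warn + 1, err)
      else if s == some "ERROR" then (warn, err + 1)
      else (warn, err)
    (total + 1, pii, cv, rank, expl, ret, warn, err)

def summarise_events_py_alt (events : List (List (String × String))) : List (String × Int) :=
  match events.foldl pvStepB (0, 0, 0, 0, 0, 0, 0, 0) with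
  | (total, pii, cv, rank, expl, ret, warn, err) =>
    [("total_events", total),
     ("pii_removal_events", pii),
     ("cv_parsed_events", cv),
     ("ranking_events", rank),
     ("explanation_events", expl),
     ("data_retained_events", ret),
     ("warnings", warn),
     ("errors", err)]

-- ===== PRECONDITION & SPEC =====
def Spec_summarise_events_py (events : List (List (String × String))) (out : List (String × Int)) : Prop := out = summarise_events_py_alt events
instance (events : List (List (String × String))) (out : List (String × Int)) : Decidable (Spec_summarise_events_py events out) := by unfold Spec_summarise_events_py; infer_instance

-- ===== CLAIM (what is proved, stated in full; the proofs are below) =====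
def Claim_equal_summarise_events_py : Prop := ∀ (events : List (List (String × String))), Dom_summarise_events_py events → Spec_summarise_events_py events (summarise_events_py events)

-- ===== LEMMAS AND PROOFS =====

-- abbreviation for A's 0/1 scan of a key against a value
def pvScan (events : List (List (String × String))) (k v : String) : Int :=
  (events.map (fun e => if pvGetKey e k == some v then (1 : Int) else 0)).sum

-- one step of the loop, written additively (the five event-type tests are mutually exclusive)
theorem pvStepB_eq (a b c d f g h i : Int) (e : List (String × String)) :
    pvStepB (a, b, c, d, f, g, h, i) e =
      (a + 1,
       b + (if pvGetKey e "event_type" == some "PII_REMOVED" then (1 : Int) else 0),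
       c + (if pvGetKey e "event_type" == some "CV_PARSED" then (1 : Int) else 0),
       d + (if pvGetKey e "event_type" == some "CANDIDATE_RANKED" then (1 : Int) else 0),
       f + (if pvGetKey e "event_type" == some "EXPLANATION_WRITTEN" then (1 : Int) else 0),
       g + (if pvGetKey e "event_type" == some "DATA_RETAINED" then (1 : Int) else 0),
       h + (if pvGetKey e "severity" == some "WARNING" then (1 : Int) else 0),
       i + (if pvGetKey e "severity" == some "ERROR" then (1 : Int) else 0)) := by
  simp only [pvStepB]
  split_ifs <;> simp_all

-- invariant: the fold from an arbitrary accumulator is the accumulator plus A's eight counts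
theorem pv_fold_char (events : List (List (String × String)))
    (a b c d f g h i : Int) :
    events.foldl pvStepB (a, b, c, d, f, g, h, i) =
      (a + events.length,
       b + pvScan events "event_type" "PII_REMOVED",
       c + pvScan events "event_type" "CV_PARSED",
       d + pvScan events "event_type" "CANDIDATE_RANKED",
       f + pvScan events "event_type" "EXPLANATION_WRITTEN",
       g + pvScan events "event_type" "DATA_RETAINED",
       h + pvScan events "severity" "WARNING",
       i + pvScan events "severity" "ERROR") := by
  induction events generalizing a b c d f g h i with
  | nil => simp [pvScan]
  | cons e es ih =>
    rw [List.foldl_cons, pvStepB_eq, ih]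
    simp only [pvScan, List.map_cons, List.sum_cons, List.length_cons]
    push_cast
    refine Prod.ext (by ring) (Prod.ext (by ring) (Prod.ext (by ring) (Prod.ext (by ring)
      (Prod.ext (by ring) (Prod.ext (by ring) (Prod.ext (by ring) (by ring)))))))

-- ===== VERDICT (by name: the statement is the Claim_ definition above) =====
theorem summarise_events_py_spec : Claim_equal_summarise_events_py := by
  intro events _
  unfold Spec_summarise_events_py summarise_events_py summarise_events_py_alt
  rw [pv_fold_char]
  simp [pvScan]
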